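-- pv_equiv track=rewrite | github.com/wbsun-java/airefiner | ui/console_interface.py | _group_models_by_provider
-- ===== SOURCE A (Python) =====
-- from typing import Dict, Any, Optional, List, Tuple
--
-- def _group_models_by_provider(available_models: List[str]) -> Dict[str, List[tuple]]:
--     """
--     Group models by their provider/company.
--
--     Args:
--         available_models: List of available model keys
--
--     Returns:
--         Dictionary mapping provider names to lists of models
--     """
--     grouped = {}
--
--     for model in available_models:
--         # Extract provider from model key (e.g., "openai/gpt-4" -> "openai")
--         if "/" in model:
--             provider = model.split("/")[0]
--             model_name = model.split("/", 1)[1]  # Get everything after first "/"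
--         else:
--             provider = "Unknown"
--             model_name = model
--
--         # Capitalize provider name for display
--         provider_display = provider.capitalize()
--
--         if provider_display not in grouped:
--             grouped[provider_display] = []
--
--         grouped[provider_display].append((model, model_name))
--
--     # Sort providers and models within each provider
--     sorted_grouped = {}
--     for provider in sorted(grouped.keys()):
--         sorted_grouped[provider] = sorted(grouped[provider], key=lambda x: x[1])
--
--     return sorted_grouped
-- ===== SOURCE B (Python) =====
-- def _group_models_by_provider(available_models):
--     def _key_name(model):
--         if "/" in model:
--             return model.split("/")[0].capitalize(), model.split("/", 1)[1]
--         return "Unknown", model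
--
--     pairs = [(_key_name(m), m) for m in available_models]
--     return {pd: sorted([(m, n) for (p, n), m in pairs if p == pd], key=lambda x: x[1])
--             for pd in sorted({p for (p, _), _ in pairs})}
-- ===== Notes on version B (the rewrite author's own statement) =====
-- stated objective: simpler
-- what changed: A builds a provider->bucket dict incrementally (create-bucket-then-append) and then rebuilds a second dict over sorted keys with per-bucket sorts; B derives (provider, name) pairs once and returns a single dict comprehension: for each sorted distinct provider, filter the matching models and sort them by name.
import Mathlib
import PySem

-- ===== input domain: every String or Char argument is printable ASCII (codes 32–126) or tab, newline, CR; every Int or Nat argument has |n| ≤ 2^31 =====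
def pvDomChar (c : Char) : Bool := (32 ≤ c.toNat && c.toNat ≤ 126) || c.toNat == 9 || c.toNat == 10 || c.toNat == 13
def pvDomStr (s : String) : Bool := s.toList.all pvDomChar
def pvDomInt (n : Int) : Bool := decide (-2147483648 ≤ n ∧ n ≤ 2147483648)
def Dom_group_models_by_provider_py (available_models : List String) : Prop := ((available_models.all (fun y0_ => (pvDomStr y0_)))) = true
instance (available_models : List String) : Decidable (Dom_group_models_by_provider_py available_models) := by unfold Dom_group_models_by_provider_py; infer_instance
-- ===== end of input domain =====

-- B replaces A's incremental dict-of-buckets plus the two-phase re-sort by one comprehension: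
-- for each sorted distinct provider, filter the matching models and sort them by name (objective: simpler).

-- hand port of Python's str.capitalize(): first char uppercased, rest lowered; exact on ASCII (used by both ports)
def pyCapitalize (s : String) : String :=
  match s.toList with
  | [] => String.ofList []
  | c :: rest => String.ofList (PySem.Chars.upperChar c :: PySem.Chars.lower rest)

-- ===== PORT A =====
def group_models_by_provider_py (available_models : List String) : List (String × List (String × String)) :=
  let grouped := available_models.foldl (fun grouped model =>
    -- if "/" in model: provider = model.split("/")[0]; model_name = model.split("/", 1)[1]  (index exists: "/" ∈ model)
    let pn : String × String :=
      if PySem.Str.isIn "/" model then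
        (((PySem.Str.split? model "/").getD []).getD 0 "",
         ((PySem.Str.splitMax? model "/" 1).getD []).getD 1 "")
      else ("Unknown", model)
    let provider_display := pyCapitalize pn.1
    let grouped := if grouped.contains provider_display = false then
        grouped.insert provider_display ([] : List (String × String))
      else grouped
    grouped.insert provider_display (grouped.getD provider_display [] ++ [(model, pn.2)]))
    PySem.Dict.empty
  let sorted_grouped := (PySem.List.sorted grouped.keys (fun k => k) false).foldl
    (fun sg provider =>
      -- grouped[provider]: provider ∈ grouped.keys, so getD never takes its default
      sg.insert provider (PySem.List.sorted (grouped.getD provider []) (fun x => x.2) false))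
    PySem.Dict.empty
  sorted_grouped.items

-- ===== PORT B =====
def pvKeyName (model : String) : String × String :=
  if PySem.Str.isIn "/" model then
    (pyCapitalize (((PySem.Str.split? model "/").getD []).getD 0 ""),
     ((PySem.Str.splitMax? model "/" 1).getD []).getD 1 "")
  else ("Unknown", model)

def group_models_by_provider_py_alt (available_models : List String) : List (String × List (String × String)) :=
  let pairs := available_models.map (fun m => (pvKeyName m, m))
  (PySem.List.sorted (PySem.Set.ofList (pairs.map (fun q => q.1.1))) (fun x => x) false).map
    (fun pd => (pd,
      PySem.List.sorted ((pairs.filter (fun q => q.1.1 == pd)).map (fun q => (q.2, q.1.2)))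
        (fun x => x.2) false))

-- ===== PRECONDITION & SPEC =====
def Spec_group_models_by_provider_py (available_models : List String) (out : List (String × List (String × String))) : Prop := out = group_models_by_provider_py_alt available_models
instance (available_models : List String) (out : List (String × List (String × String))) : Decidable (Spec_group_models_by_provider_py available_models out) := by unfold Spec_group_models_by_provider_py; infer_instance

-- ===== CLAIM (what is proved, stated in full; the proofs are below) =====
def Claim_equal_group_models_by_provider_py : Prop := ∀ (available_models : List String), Dom_group_models_by_provider_py available_models → Spec_group_models_by_provider_py available_models (group_models_by_provider_py available_models)

-- ===== LEMMAS AND PROOFS =====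

-- A's "ensure bucket exists, then append" is one dict modify
lemma pvAppendStep (d : PySem.Dict String (List (String × String))) (k : String)
    (x : String × String) :
    (let d' := if d.contains k = false then d.insert k ([] : List (String × String)) else d
     d'.insert k (d'.getD k [] ++ [x])) = d.modify k [] (· ++ [x]) := by
  cases hc : d.contains k with
  | false =>
      simp only [if_pos, PySem.Dict.modify, PySem.Dict.getD_insert,
        PySem.Dict.insert_insert_self, PySem.Dict.getD_of_not_contains d [] hc,
        List.nil_append]
  | true => simp [PySem.Dict.modify]

lemma pvCapUnknown : pyCapitalize "Unknown" = "Unknown" := by decide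

-- A's inner loop body equals a modify step keyed by pvKeyName
lemma pvStepEq (d : PySem.Dict String (List (String × String))) (m : String) :
    (let pn : String × String :=
      if PySem.Str.isIn "/" m then
        (((PySem.Str.split? m "/").getD []).getD 0 "",
         ((PySem.Str.splitMax? m "/" 1).getD []).getD 1 "")
      else ("Unknown", m)
     let provider_display := pyCapitalize pn.1
     let d' := if d.contains provider_display = false then
         d.insert provider_display ([] : List (String × String))
       else d
     d'.insert provider_display (d'.getD provider_display [] ++ [(m, pn.2)]))
    = d.modify (pvKeyName m).1 [] (· ++ [(m, (pvKeyName m).2)]) := by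
  by_cases h : PySem.Str.isIn "/" m
  · simp only [pvKeyName, h, if_pos]
    exact pvAppendStep d _ _
  · simp only [pvKeyName, h, if_neg, Bool.false_eq_true, not_false_iff, pvCapUnknown]
    rw [← pvCapUnknown]
    exact pvAppendStep d _ _

-- ===== VERDICT (by name: the statement is the Claim_ definition above) =====
theorem group_models_by_provider_py_spec : Claim_equal_group_models_by_provider_py := by
  unfold Claim_equal_group_models_by_provider_py Spec_group_models_by_provider_py
  intro ms _
  unfold group_models_by_provider_py group_models_by_provider_py_alt
  -- the grouping dict of A, in modify-fold form over key/value pairs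
  have hfold :
      ms.foldl (fun grouped model =>
        let pn : String × String :=
          if PySem.Str.isIn "/" model then
            (((PySem.Str.split? model "/").getD []).getD 0 "",
             ((PySem.Str.splitMax? model "/" 1).getD []).getD 1 "")
          else ("Unknown", model)
        let provider_display := pyCapitalize pn.1
        let grouped := if grouped.contains provider_display = false then
            grouped.insert provider_display ([] : List (String × String))
          else grouped
        grouped.insert provider_display (grouped.getD provider_display [] ++ [(model, pn.2)]))
        PySem.Dict.empty
      = (ms.map (fun m => ((pvKeyName m).1, (m, (pvKeyName m).2)))).foldl
          (fun d p => d.modify p.1 [] (· ++ [p.2])) PySem.Dict.empty := by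
    rw [List.foldl_map]
    exact PySem.List.foldl_congr_mem ms _ _ _ (fun d m _ => pvStepEq d m)
  rw [hfold]
  set pairsL := ms.map (fun m => ((pvKeyName m).1, (m, (pvKeyName m).2))) with hpairsL
  set G := pairsL.foldl (fun d p => d.modify p.1 [] (· ++ [p.2])) PySem.Dict.empty with hG
  -- keys of the grouping dict = distinct providers, in first-occurrence order
  have hkeys : G.keys = PySem.Set.ofList (ms.map (fun m => (pvKeyName m).1)) := by
    rw [hG, PySem.Dict.keys_foldl_modify_key pairsL Prod.fst [] (fun _ p => (· ++ [p.2]))]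
    simp [PySem.Dict.keys_empty, PySem.Set.update, PySem.Set.ofList_eq_foldl, hpairsL,
      List.map_map, Function.comp_def]
  have hnodup : (PySem.List.sorted G.keys (fun k => k) false).Nodup :=
    (PySem.List.sorted_perm G.keys (fun k => k) false).symm.nodup
      (PySem.Dict.nodup_keys_foldl_modify_key pairsL Prod.fst [] (fun _ p => (· ++ [p.2]))
        PySem.Dict.empty PySem.Dict.nodup_keys_empty)
  -- the second loop inserts fresh distinct keys into an empty dict: its items are a map
  have hitems := PySem.Dict.items_foldl_insert_fresh
      (PySem.List.sorted G.keys (fun k => k) false) (fun p => p)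
      (fun p => PySem.List.sorted (G.getD p []) (fun x => x.2) false) PySem.Dict.empty
      (fun a _ => PySem.Dict.contains_empty a) (by simpa using hnodup)
  simp only [hitems]
  have hempty : (PySem.Dict.empty : PySem.Dict String (List (String × String))).items = [] := rfl
  rw [hempty, List.nil_append, hkeys]
  -- both sides are a map over sorted distinct providers; align each entry
  have hkeymap : (ms.map (fun m => (pvKeyName m, m))).map (fun q => q.1.1)
      = ms.map (fun m => (pvKeyName m).1) := by simp [List.map_map, Function.comp]
  rw [hkeymap]
  refine List.map_congr_left (fun pd _ => ?_)
  have hget : G.getD pd []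
      = (ms.filter (fun m => (pvKeyName m).1 == pd)).map (fun m => (m, (pvKeyName m).2)) := by
    rw [hG, PySem.Dict.getD_foldl_modify_append pairsL PySem.Dict.empty pd,
      PySem.Dict.getD_empty, List.nil_append, hpairsL, List.filter_map]
    simp [List.map_map, Function.comp_def]
  have hBfilter : ((ms.map (fun m => (pvKeyName m, m))).filter (fun q => q.1.1 == pd)).map
        (fun q => (q.2, q.1.2))
      = (ms.filter (fun m => (pvKeyName m).1 == pd)).map (fun m => (m, (pvKeyName m).2)) := by
    rw [List.filter_map]
    simp [List.map_map, Function.comp_def]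
  rw [hget, hBfilter]
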